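-- pv_equiv track=rewrite | github.com/epiphany40223/epiphany | media/linux/pds-sqlite3-queries/sync-google-group.py | _member_has_any_keyword
-- ===== SOURCE A (Python) =====
-- def _member_has_any_keyword(member, keywords):
--     if 'keywords' not in member:
--         return False, False
--
--     found_any  = False
--     poster_of_any = False
--     for k in keywords:
--         if k in member['keywords']:
--             found_any     = True
--         if '{key} Ldr'.format(key=k) in member['keywords']:
--             found_any     = True
--             poster_of_any = True
--
--     return found_any, poster_of_any
-- ===== SOURCE B (Python) =====
-- def _member_has_any_keyword(member, keywords):
--     # Two declarative passes over the member's own tags (no accumulator loop):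
--     # 'leader' holds iff some tag is '<kw> Ldr' for a query keyword,
--     # 'direct' iff some tag is itself a query keyword.
--     if 'keywords' not in member:
--         return False, False
--     mks = member['keywords']
--     kw = set(keywords)
--     leader = any(mk.endswith(' Ldr') and mk[:-4] in kw for mk in mks)
--     direct = any(mk in kw for mk in mks)
--     return direct or leader, leader
-- ===== Notes on version B (the rewrite author's own statement) =====
-- stated objective: alternative
-- what changed: B replaces A's stateful loop over every query keyword (each with a linear scan of the member's tag list) by two declarative any-passes over the member's own tags, recognising leader tags by their ' Ldr' suffix and testing membership in a set built once from the query keywords; asymptotically O(n+m) vs O(n*m) but not measurably faster on the generated inputs.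
import Mathlib
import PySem

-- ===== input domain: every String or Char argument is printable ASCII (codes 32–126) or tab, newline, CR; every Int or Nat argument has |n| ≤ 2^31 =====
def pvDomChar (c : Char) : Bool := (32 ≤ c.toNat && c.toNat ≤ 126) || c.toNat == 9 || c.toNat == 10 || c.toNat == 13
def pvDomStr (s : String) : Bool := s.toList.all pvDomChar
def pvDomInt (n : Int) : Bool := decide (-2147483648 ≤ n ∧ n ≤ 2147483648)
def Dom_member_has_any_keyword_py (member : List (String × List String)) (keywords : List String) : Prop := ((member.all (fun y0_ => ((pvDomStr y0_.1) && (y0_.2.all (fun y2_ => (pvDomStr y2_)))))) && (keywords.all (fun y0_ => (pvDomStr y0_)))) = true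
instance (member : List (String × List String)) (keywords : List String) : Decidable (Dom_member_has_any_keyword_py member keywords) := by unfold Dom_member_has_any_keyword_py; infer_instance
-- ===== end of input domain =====

-- B replaces A's stateful loop over the query keywords by two declarative
-- any-passes over the member's own tags (leader tags parsed by their ' Ldr'
-- suffix, membership in a set of the query keywords built once).

-- ===== PORT A =====
def member_has_any_keyword_py (member : List (String × List String)) (keywords : List String) : Bool × Bool :=
  match List.lookup "keywords" member with   -- 'keywords' in member / member['keywords']: first match
  | none => (false, false)
  | some mks =>
      keywords.foldl (fun s k =>
        let s := if mks.contains k then (true, s.2) else s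
        if mks.contains (k ++ " Ldr") then (true, true) else s)
        (false, false)

-- ===== PORT B =====
def member_has_any_keyword_py_alt (member : List (String × List String)) (keywords : List String) : Bool × Bool :=
  match List.lookup "keywords" member with   -- 'keywords' in member / member['keywords']: first match
  | none => (false, false)
  | some mks =>
      let kw : PySem.Set String := PySem.Set.ofList keywords
      let leader : Bool := mks.any (fun mk =>
        PySem.Str.endswith mk " Ldr" && PySem.Set.contains kw (PySem.Str.slice mk none (some (-4))))
      let direct : Bool := mks.any (fun mk => PySem.Set.contains kw mk)
      (direct || leader, leader)

-- ===== PRECONDITION & SPEC =====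
def Spec_member_has_any_keyword_py (member : List (String × List String)) (keywords : List String) (out : Bool × Bool) : Prop := out = member_has_any_keyword_py_alt member keywords
instance (member : List (String × List String)) (keywords : List String) (out : Bool × Bool) : Decidable (Spec_member_has_any_keyword_py member keywords out) := by unfold Spec_member_has_any_keyword_py; infer_instance

-- ===== CLAIM (what is proved, stated in full; the proofs are below) =====
def Claim_equal_member_has_any_keyword_py : Prop := ∀ (member : List (String × List String)) (keywords : List String), Dom_member_has_any_keyword_py member keywords → Spec_member_has_any_keyword_py member keywords (member_has_any_keyword_py member keywords)

-- ===== LEMMAS AND PROOFS =====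

/-- Closed form of A's loop: two sticky flags driven by per-element tests. -/
lemma fold_flags {α : Type} (c1 c2 : α → Bool) (xs : List α) (f p : Bool) :
    xs.foldl (fun s x =>
        let s := if c1 x then (true, s.2) else s
        if c2 x then (true, true) else s) (f, p)
    = (f || xs.any (fun x => c1 x || c2 x), p || xs.any c2) := by
  induction xs generalizing f p with
  | nil => simp
  | cons x xs ih =>
    simp only [List.foldl_cons, List.any_cons]
    by_cases h1 : c1 x <;> by_cases h2 : c2 x <;>
      simp [h1, h2, ih]

lemma any_or_split {α : Type} (xs : List α) (p q : α → Bool) :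
    xs.any (fun x => p x || q x) = (xs.any p || xs.any q) := by
  induction xs with
  | nil => rfl
  | cons x xs ih => simp [ih, Bool.or_assoc, Bool.or_left_comm]

/-- mk[:-4] on the character list. -/
lemma slice_neg4 (s : String) :
    (PySem.Str.slice s none (some (-4))).toList = s.toList.take (s.toList.length - 4) := by
  rw [PySem.Str.toList_slice, PySem.Chars.slice_eq_listSlice,
      show ((-4 : Int)) = -((4 : Nat) : Int) by norm_num,
      PySem.List.slice_to_neg_natCast _ _ (by norm_num)]

/-- A tag is the leader tag of keyword k iff it ends with " Ldr" and dropping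
    the last four characters yields k. -/
lemma ldr_iff (mk k : String) :
    mk = k ++ " Ldr" ↔
    (PySem.Str.endswith mk " Ldr" = true ∧ PySem.Str.slice mk none (some (-4)) = k) := by
  constructor
  · rintro rfl
    refine ⟨?_, ?_⟩
    · simp [PySem.Str.endswith_eq, PySem.Chars.endswith_iff]
    · apply String.toList_injective
      rw [slice_neg4]
      simp
  · rintro ⟨he, hs⟩
    rw [PySem.Str.endswith_eq, PySem.Chars.endswith_iff] at he
    obtain ⟨pre, hpre⟩ := he
    apply String.toList_injective
    have hk : k.toList = pre := by
      rw [← hs, slice_neg4, ← hpre]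
      simp
    simp [← hpre, hk]

/-- Leader-tag detection: scanning for k ++ " Ldr" over the keywords equals
    suffix-parsing over the member tags. -/
lemma any_ldr_eq (keywords mks : List String) :
    keywords.any (fun k => mks.contains (k ++ " Ldr"))
    = mks.any (fun mk => PySem.Str.endswith mk " Ldr" &&
        PySem.Set.contains (PySem.Set.ofList keywords) (PySem.Str.slice mk none (some (-4)))) := by
  apply Bool.eq_iff_iff.mpr
  simp only [List.any_eq_true, List.contains_iff_mem, Bool.and_eq_true,
    PySem.Set.contains_eq_listContains, PySem.Set.mem_ofList]
  constructor
  · rintro ⟨k, hk, hmem⟩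
    refine ⟨k ++ " Ldr", hmem, ((ldr_iff (k ++ " Ldr") k).mp rfl).1, ?_⟩
    rw [((ldr_iff (k ++ " Ldr") k).mp rfl).2]
    simpa [List.contains_iff_mem] using hk
  · rintro ⟨mk, hmk, he, hc⟩
    refine ⟨PySem.Str.slice mk none (some (-4)), hc, ?_⟩
    have := (ldr_iff mk (PySem.Str.slice mk none (some (-4)))).mpr ⟨he, rfl⟩
    rwa [← this]

/-- Direct matches: scanning the keywords equals a set-membership pass over the tags. -/
lemma any_direct_eq (keywords mks : List String) :
    keywords.any (fun k => mks.contains k)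
    = mks.any (fun mk => PySem.Set.contains (PySem.Set.ofList keywords) mk) := by
  apply Bool.eq_iff_iff.mpr
  simp only [List.any_eq_true, List.contains_iff_mem,
    PySem.Set.contains_eq_listContains, PySem.Set.mem_ofList]
  constructor
  · rintro ⟨k, hk, hm⟩; exact ⟨k, hm, by simpa [List.contains_iff_mem] using hk⟩
  · rintro ⟨mk, hm, hk⟩; exact ⟨mk, by simpa [List.contains_iff_mem] using hk, hm⟩

-- ===== VERDICT (by name: the statement is the Claim_ definition above) =====
theorem member_has_any_keyword_py_spec : Claim_equal_member_has_any_keyword_py := by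
  intro member keywords _
  unfold Spec_member_has_any_keyword_py member_has_any_keyword_py member_has_any_keyword_py_alt
  cases List.lookup "keywords" member with
  | none => rfl
  | some mks =>
    show (keywords.foldl _ (false, false) : Bool × Bool) = _
    rw [fold_flags (fun k => mks.contains k) (fun k => mks.contains (k ++ " Ldr")),
        any_or_split, any_direct_eq, any_ldr_eq]
    simp
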